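-- pv_equiv track=rewrite | github.com/Mekkaspark/AdventOfCode2023 | Day_1_Trebuchet/part2.py | find_shared_middle_combinations
-- ===== SOURCE A (Python) =====
-- from itertools import permutations
--
-- def find_shared_middle_combinations(words):
--     shared_combinations = []
--
--     # Generate all unique pairs of words
--     for word1, word2 in permutations(words, 2):
--         for i in range(1, len(word1)):
--             if word1[i:] == word2[:len(word1[i:])]:
--                 shared_combinations.append(word1 + word2)
--                 break
--     return shared_combinations
-- ===== SOURCE B (Python) =====
-- def find_shared_middle_combinations(words):
--     # Precompute, once per word, the set of its non-empty prefixes and the set of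
--     # its non-empty proper suffixes; a pair qualifies iff the two sets intersect.
--     prefs = [{w[:k] for k in range(1, len(w) + 1)} for w in words]
--     sufs = [{w[i:] for i in range(1, len(w))} for w in words]
--     out = []
--     for i, w1 in enumerate(words):
--         s1 = sufs[i]
--         for j, w2 in enumerate(words):
--             if i != j and not s1.isdisjoint(prefs[j]):
--                 out.append(w1 + w2)
--     return out
-- ===== Notes on version B (the rewrite author's own statement) =====
-- stated objective: faster
-- what changed: Instead of re-slicing and comparing every suffix of word1 against the matching-length prefix of word2 for each ordered pair, B precomputes once per word the hash set of its non-empty prefixes and of its non-empty proper suffixes and decides each pair by a set-intersection (isdisjoint) test.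
import Mathlib
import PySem

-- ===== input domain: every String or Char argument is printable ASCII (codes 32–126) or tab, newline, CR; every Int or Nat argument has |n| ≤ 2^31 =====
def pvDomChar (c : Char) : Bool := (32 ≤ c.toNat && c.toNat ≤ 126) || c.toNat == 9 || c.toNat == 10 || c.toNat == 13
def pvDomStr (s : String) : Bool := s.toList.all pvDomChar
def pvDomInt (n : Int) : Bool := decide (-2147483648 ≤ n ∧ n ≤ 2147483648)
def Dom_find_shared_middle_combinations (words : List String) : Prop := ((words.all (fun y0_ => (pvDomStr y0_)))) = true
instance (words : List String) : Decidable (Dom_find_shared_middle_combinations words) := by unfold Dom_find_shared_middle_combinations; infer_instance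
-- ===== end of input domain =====

-- B replaces A's per-pair scan over all suffix/truncated-prefix slice comparisons by
-- per-word precomputed prefix- and suffix-sets that are intersected per ordered pair.

-- ===== PORT A =====
-- inner loop of A: 'for i in range(1, len(word1)): if word1[i:] == word2[:len(word1[i:])]: append; break'
def pvAHit (w1 w2 : String) : Bool :=
  (PySem.List.pyRange 1 (PySem.Str.len w1) 1).any (fun i =>
    PySem.Str.slice w1 (some i) none ==
      PySem.Str.slice w2 none (some (PySem.Str.len (PySem.Str.slice w1 (some i) none))))

def find_shared_middle_combinations (words : List String) : List String :=
  (PySem.List.permutations words 2).foldl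
    (fun acc pair =>
      match pair with
      | [w1, w2] => if pvAHit w1 w2 then acc ++ [w1 ++ w2] else acc
      | _ => acc) []

-- ===== PORT B =====
-- {w[:k] for k in range(1, len(w) + 1)}
def pvPrefixSet (w : String) : PySem.Set String :=
  PySem.Set.ofList ((PySem.List.pyRange 1 (PySem.Str.len w + 1) 1).map
    (fun k => PySem.Str.slice w none (some k)))

-- {w[i:] for i in range(1, len(w))}
def pvSuffixSet (w : String) : PySem.Set String :=
  PySem.Set.ofList ((PySem.List.pyRange 1 (PySem.Str.len w) 1).map
    (fun i => PySem.Str.slice w (some i) none))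

def find_shared_middle_combinations_alt (words : List String) : List String :=
  let prefs := words.map pvPrefixSet
  let sufs := words.map pvSuffixSet
  (PySem.List.enumerate words).foldl
    (fun acc p =>
      let s1 := PySem.List.pyGetD sufs p.1 PySem.Set.empty
      (PySem.List.enumerate words).foldl
        (fun acc2 q =>
          if p.1 != q.1 && !(PySem.Set.isdisjoint s1 (PySem.List.pyGetD prefs q.1 PySem.Set.empty))
          then acc2 ++ [p.2 ++ q.2] else acc2) acc) []

-- ===== PRECONDITION & SPEC =====
def Spec_find_shared_middle_combinations (words : List String) (out : List String) : Prop := out = find_shared_middle_combinations_alt words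
instance (words : List String) (out : List String) : Decidable (Spec_find_shared_middle_combinations words out) := by unfold Spec_find_shared_middle_combinations; infer_instance

-- ===== CLAIM (what is proved, stated in full; the proofs are below) =====
def Claim_equal_find_shared_middle_combinations : Prop := ∀ (words : List String), Dom_find_shared_middle_combinations words → Spec_find_shared_middle_combinations words (find_shared_middle_combinations words)

-- ===== LEMMAS AND PROOFS =====

theorem pv_flatMap_range {α β : Type} (ys : List α) (g : Option α → List β) :
    (List.range ys.length).flatMap (fun i => g ys[i]?) = ys.flatMap (fun x => g (some x)) := by
  induction ys with
  | nil => simp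
  | cons y t ih =>
    simp [List.range_succ_eq_map, List.flatMap_map]
    exact ih

theorem pv_map_getD_range {α : Type} (xs : List α) (d : α) :
    (List.range xs.length).map (fun j => xs.getD j d) = xs := by
  induction xs with
  | nil => simp
  | cons x t ih => simp [List.range_succ_eq_map, List.map_map, Function.comp_def]; exact ih

theorem pv_eraseIdx_eq {α : Type} (xs : List α) (i : Nat) (d : α) :
    xs.eraseIdx i =
      ((List.range xs.length).filter (fun j => j ≠ i)).map (fun j => xs.getD j d) := by
  induction xs generalizing i with
  | nil => simp
  | cons x t ih =>
    cases i with
    | zero =>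
      simp [List.range_succ_eq_map, List.filter_map, Function.comp_def]
      have := pv_map_getD_range t d
      simp only [List.getD_eq_getElem?_getD] at this
      exact this.symm
    | succ n =>
      simp [List.range_succ_eq_map, List.filter_map, Function.comp_def, ih n]

theorem pv_perm_one {α : Type} (ys : List α) :
    PySem.List.permutations ys 1 = ys.map (fun y => [y]) := by
  have h0 : ∀ (l : List α), PySem.List.permutations l 0 = [[]] := fun l => by
    rw [PySem.List.permutations]
  rw [PySem.List.permutations]
  simp only [h0, List.map_cons, List.map_nil]
  refine (pv_flatMap_range ys (fun o => match o with | none => [] | some x => [[x]])).trans ?_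
  induction ys with
  | nil => rfl
  | cons y t ih => simpa using ih

theorem pv_perm_two {α : Type} (xs : List α) :
    PySem.List.permutations xs 2 =
      (List.range xs.length).flatMap (fun i =>
        match xs[i]? with
        | none => []
        | some x => (xs.eraseIdx i).map (fun y => [x, y])) := by
  rw [PySem.List.permutations]
  congr 1
  funext i
  cases h : xs[i]? with
  | none => simp
  | some x => simp [pv_perm_one, List.map_map, Function.comp_def]

def pvPairs (xs : List String) : List String :=
  (List.range xs.length).flatMap (fun i =>
    (((List.range xs.length).filter (fun j => j ≠ i)).filter
        (fun j => pvAHit (xs.getD i "") (xs.getD j ""))).map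
      (fun j => xs.getD i "" ++ xs.getD j ""))

def pvPB : List String → Bool
  | [w1, w2] => pvAHit w1 w2
  | _ => false

def pvFB : List String → String
  | [w1, w2] => w1 ++ w2
  | _ => ""

theorem pv_A_eq (xs : List String) : find_shared_middle_combinations xs = pvPairs xs := by
  unfold find_shared_middle_combinations
  have hbody : (fun (acc : List String) (pair : List String) =>
      match pair with
      | [w1, w2] => if pvAHit w1 w2 then acc ++ [w1 ++ w2] else acc
      | _ => acc) = (fun acc pair => if pvPB pair then acc ++ [pvFB pair] else acc) := by
    funext acc pair
    match pair with
    | [] => rfl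
    | [_] => rfl
    | [_, _] => rfl
    | _ :: _ :: _ :: _ => rfl
  rw [hbody, PySem.List.foldl_append_if pvPB pvFB, pv_perm_two, List.filter_flatMap,
      List.map_flatMap]
  unfold pvPairs
  apply congrArg List.flatten
  apply List.map_congr_left
  intro i hi
  rw [List.mem_range] at hi
  have hx : xs[i]? = some (xs.getD i "") := by
    rw [List.getElem?_eq_getElem hi, List.getD_eq_getElem _ _ hi]
  rw [hx]
  show ((((xs.eraseIdx i).map (fun y => [xs.getD i "", y])).filter pvPB).map pvFB) = _
  rw [List.filter_map, List.map_map, pv_eraseIdx_eq xs i "", List.filter_map, List.map_map]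
  rfl

theorem pv_toList_slice_from (w : String) (i : Int) (h1 : 0 ≤ i) :
    (PySem.Str.slice w (some i) none).toList = w.toList.drop i.toNat := by
  rw [PySem.Str.toList_slice, PySem.Chars.slice_eq_listSlice, PySem.List.slice_from _ h1]

theorem pv_toList_slice_to (w : String) (b : Int) (h1 : 0 ≤ b) :
    (PySem.Str.slice w none (some b)).toList = w.toList.take b.toNat := by
  rw [PySem.Str.toList_slice, PySem.Chars.slice_eq_listSlice, PySem.List.slice_to _ h1]

theorem pv_hit_eq (w1 w2 : String) :
    pvAHit w1 w2 = !(PySem.Set.isdisjoint (pvSuffixSet w1) (pvPrefixSet w2)) := by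
  rw [Bool.eq_iff_iff]
  unfold pvAHit pvSuffixSet pvPrefixSet PySem.Set.isdisjoint PySem.Set.contains
  simp only [Bool.not_not, List.any_eq_true, PySem.Set.mem_ofList, List.mem_map,
    PySem.List.mem_pyRange_one, beq_iff_eq, List.contains_iff_mem, PySem.Str.len_eq]
  constructor
  · rintro ⟨i, ⟨hi1, hi2⟩, heq⟩
    have h0 : (0:Int) ≤ i := by omega
    have hm : (PySem.Str.slice w1 (some i) none).toList.length
        = w1.toList.length - i.toNat := by
      rw [pv_toList_slice_from _ _ h0, List.length_drop]
    have hiL : i.toNat < w1.toList.length := by omega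
    refine ⟨PySem.Str.slice w1 (some i) none,
      ⟨i, ⟨hi1, hi2⟩, rfl⟩,
      ⟨((PySem.Str.slice w1 (some i) none).toList.length : Int), ⟨?_, ?_⟩, heq.symm⟩⟩
    · rw [hm]; omega
    · have := congrArg (fun s : String => s.toList.length) heq
      dsimp only at this
      rw [pv_toList_slice_to _ _ (Int.natCast_nonneg _)] at this
      rw [List.length_take] at this
      omega
  · rintro ⟨x, ⟨i, ⟨hi1, hi2⟩, hxi⟩, ⟨k, ⟨hk1, hk2⟩, hxk⟩⟩
    refine ⟨i, ⟨hi1, hi2⟩, ?_⟩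
    have h0 : (0:Int) ≤ i := by omega
    have hk0 : (0:Int) ≤ k := by omega
    have hlen : x.toList.length = k.toNat := by
      rw [← hxk, pv_toList_slice_to _ _ hk0, List.length_take]
      omega
    rw [hxi, hlen, Int.toNat_of_nonneg hk0, hxk]

theorem pv_B_eq (xs : List String) : find_shared_middle_combinations_alt xs = pvPairs xs := by
  unfold find_shared_middle_combinations_alt
  simp only []
  have hbody : (fun (acc : List String) (p : Int × String) =>
      (PySem.List.enumerate xs).foldl
        (fun acc2 q =>
          if p.1 != q.1 && !(PySem.Set.isdisjoint
                (PySem.List.pyGetD (xs.map pvSuffixSet) p.1 PySem.Set.empty)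
                (PySem.List.pyGetD (xs.map pvPrefixSet) q.1 PySem.Set.empty))
          then acc2 ++ [p.2 ++ q.2] else acc2) acc)
      = (fun acc p => acc ++
          ((PySem.List.enumerate xs).filter (fun q =>
            p.1 != q.1 && !(PySem.Set.isdisjoint
                (PySem.List.pyGetD (xs.map pvSuffixSet) p.1 PySem.Set.empty)
                (PySem.List.pyGetD (xs.map pvPrefixSet) q.1 PySem.Set.empty)))).map
            (fun q => p.2 ++ q.2)) := by
    funext acc p
    exact PySem.List.foldl_append_if _ _ _ _
  rw [hbody, PySem.List.foldl_append_eq_flatMap]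
  rw [PySem.List.enumerate_eq_map_pyRange xs ""]
  rw [show PySem.List.len xs = (xs.length : Int) from rfl, PySem.List.pyRange_zero_nat]
  simp only [List.map_map, List.flatMap_map, List.filter_map, Function.comp_def,
    PySem.List.pyGetD_natCast]
  unfold pvPairs
  apply congrArg List.flatten
  apply List.map_congr_left
  intro i hi
  rw [List.mem_range] at hi
  rw [List.filter_filter]
  apply congrArg
  apply List.filter_congr
  intro j hj
  rw [List.mem_range] at hj
  have hsuf : (List.map pvSuffixSet xs).getD i PySem.Set.empty = pvSuffixSet (xs.getD i "") := by
    rw [List.getD_eq_getElem _ _ (by simpa using hi), List.getElem_map, List.getD_eq_getElem _ _ hi]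
  have hpre : (List.map pvPrefixSet xs).getD j PySem.Set.empty = pvPrefixSet (xs.getD j "") := by
    rw [List.getD_eq_getElem _ _ (by simpa using hj), List.getElem_map, List.getD_eq_getElem _ _ hj]
  simp only [List.getD_eq_getElem?_getD, List.getElem?_map, List.getElem?_eq_getElem hi,
    List.getElem?_eq_getElem hj, Option.map_some, Option.getD_some]
  simp [pv_hit_eq, bne, Bool.and_comm, eq_comm]
  congr 1
  by_cases h : i = j <;> simp [h]

-- ===== VERDICT (by name: the statement is the Claim_ definition above) =====
theorem find_shared_middle_combinations_spec : Claim_equal_find_shared_middle_combinations := by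
  intro words _
  show _ = _
  rw [pv_A_eq, pv_B_eq]
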